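-- pv_equiv track=rewrite | github.com/danieljhkim/DataStructures-Algorithms | python/leetcode/practice/practice11.py | resultingString
-- ===== SOURCE A (Python) =====
-- def resultingString(s: str) -> str:
--     res = []
--     for i in range(len(s)):
--         ch1 = ord(s[i])
--         if res:
--             prev = ord(res[-1])
--             diff = abs(prev - ch1)
--             if diff == 1 or diff == 25:
--                 res.pop()
--             else:
--                 res.append(s[i])
--         else:
--             res.append(s[i])
--     return "".join(res)
-- ===== SOURCE B (Python) =====
-- def resultingString(s: str) -> str:
--     cs = list(s)
--     changed = True
--     while changed:
--         changed = False
--         for i in range(len(cs) - 1):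
--             d = abs(ord(cs[i]) - ord(cs[i + 1]))
--             if d == 1 or d == 25:
--                 del cs[i:i + 2]
--                 changed = True
--                 break
--     return "".join(cs)
-- ===== Notes on version B (the rewrite author's own statement) =====
-- stated objective: alternative
-- what changed: Replaced the one-pass stack with a repeat-until-stable reducer that rescans the string and deletes the leftmost adjacent pair with ord-difference 1 or 25 until no pass removes anything.
import Mathlib
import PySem

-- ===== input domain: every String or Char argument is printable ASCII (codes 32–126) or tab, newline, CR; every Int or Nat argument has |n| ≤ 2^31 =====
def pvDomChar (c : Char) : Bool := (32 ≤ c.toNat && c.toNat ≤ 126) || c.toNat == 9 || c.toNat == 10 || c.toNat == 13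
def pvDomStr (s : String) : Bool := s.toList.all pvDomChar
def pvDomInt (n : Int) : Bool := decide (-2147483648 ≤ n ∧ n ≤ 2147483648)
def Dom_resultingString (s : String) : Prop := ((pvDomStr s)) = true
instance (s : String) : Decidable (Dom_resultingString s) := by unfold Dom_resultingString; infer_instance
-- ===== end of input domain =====

-- B is an alternative (not faster) re-implementation: repeated leftmost-pair cancellation to a fixpoint instead of A's one-pass stack.

-- shared: does the adjacent pair (a, b) cancel? (|ord a - ord b| ∈ {1, 25})
def pvCancels (a b : Char) : Bool :=
  let d : Int := (a.toNat : Int) - (b.toNat : Int)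
  d.natAbs == 1 || d.natAbs == 25

-- ===== PORT A =====
-- Python list `res` is kept reversed (cons = append, head = res[-1]); final reverse restores order.
def pvStackStep (res : List Char) (c : Char) : List Char :=
  match res with
  | [] => [c]
  | p :: rest => if pvCancels p c then rest else c :: p :: rest

def resultingString (s : String) : String :=
  String.mk ((s.toList.foldl pvStackStep []).reverse)

-- ===== PORT B =====
-- one scan: remove the LEFTMOST adjacent cancelling pair; none = the pass changed nothing
def pvSweep? : List Char → Option (List Char)
  | [] => none
  | [_] => none
  | a :: b :: t => if pvCancels a b then some t else (pvSweep? (b :: t)).map (a :: ·)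

theorem pvSweep_length : ∀ (cs cs' : List Char), pvSweep? cs = some cs' → cs'.length < cs.length := by
  intro cs
  induction cs with
  | nil => intro cs' h; simp [pvSweep?] at h
  | cons a t ih =>
    intro cs' h
    match t, h with
    | [], h => simp [pvSweep?] at h
    | b :: t, h =>
      simp only [pvSweep?] at h
      split at h
      · cases h; simp
      · cases hr : pvSweep? (b :: t) with
        | none => rw [hr] at h; simp at h
        | some r =>
          rw [hr] at h
          simp at h
          have := ih r hr
          subst h
          simpa using Nat.succ_lt_succ this

-- the while loop: sweep until a pass removes nothing
def pvReduce (cs : List Char) : List Char :=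
  match h : pvSweep? cs with
  | none => cs
  | some cs' => pvReduce cs'
termination_by cs.length
decreasing_by exact pvSweep_length _ _ h

def resultingString_alt (s : String) : String :=
  String.mk (pvReduce s.toList)

-- ===== PRECONDITION & SPEC =====
def Spec_resultingString (s : String) (out : String) : Prop := out = resultingString_alt s
instance (s : String) (out : String) : Decidable (Spec_resultingString s out) := by unfold Spec_resultingString; infer_instance

-- ===== CLAIM (what is proved, stated in full; the proofs are below) =====
def Claim_equal_resultingString : Prop := ∀ (s : String), Dom_resultingString s → Spec_resultingString s (resultingString s)

-- ===== LEMMAS AND PROOFS =====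

-- "no adjacent cancelling pair" (the stack's contents, read in order, always satisfy this)
def pvIrred : List Char → Bool
  | [] => true
  | [_] => true
  | a :: b :: t => !pvCancels a b && pvIrred (b :: t)

theorem pvSweep_of_irred : ∀ (cs : List Char), pvIrred cs = true → pvSweep? cs = none := by
  intro cs
  induction cs with
  | nil => intro _; rfl
  | cons a t ih =>
    intro h
    match t, h with
    | [], _ => rfl
    | b :: t, h =>
      simp only [pvIrred, Bool.and_eq_true, Bool.not_eq_true'] at h
      simp [pvSweep?, h.1, ih h.2]

theorem pvReduce_irred (cs : List Char) (h : pvIrred cs = true) : pvReduce cs = cs := by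
  rw [pvReduce, pvSweep_of_irred cs h]

theorem pvIrred_dropLast : ∀ (zs : List Char) (p : Char), pvIrred (zs ++ [p]) = true → pvIrred zs = true := by
  intro zs
  induction zs with
  | nil => intro p _; rfl
  | cons a t ih =>
    intro p h
    match t, h with
    | [], _ => rfl
    | b :: t, h =>
      simp only [List.cons_append, pvIrred, Bool.and_eq_true] at h ⊢
      exact ⟨h.1, ih p h.2⟩

theorem pvIrred_push : ∀ (zs : List Char) (p c : Char), pvIrred (zs ++ [p]) = true →
    pvCancels p c = false → pvIrred (zs ++ [p, c]) = true := by
  intro zs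
  induction zs with
  | nil => intro p c _ hc; simp [pvIrred, hc]
  | cons a t ih =>
    intro p c h hc
    match t, h with
    | [], h =>
      simp only [List.cons_append, List.nil_append, pvIrred, Bool.and_eq_true] at h ⊢
      exact ⟨h.1, by simp [pvIrred, hc]⟩
    | b :: t, h =>
      simp only [List.cons_append, pvIrred, Bool.and_eq_true] at h ⊢
      exact ⟨h.1, ih p c h.2 hc⟩

-- the leftmost cancelling pair in (irreducible ++ [p]) ++ c :: tail, with (p,c) cancelling, is (p,c)
theorem pvSweep_append : ∀ (zs : List Char) (p c : Char) (tail : List Char),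
    pvIrred (zs ++ [p]) = true → pvCancels p c = true →
    pvSweep? (zs ++ p :: c :: tail) = some (zs ++ tail) := by
  intro zs
  induction zs with
  | nil => intro p c tail _ hc; simp [pvSweep?, hc]
  | cons a t ih =>
    intro p c tail h hc
    match t, h with
    | [], h =>
      simp only [List.cons_append, List.nil_append, pvIrred, Bool.and_eq_true,
        Bool.not_eq_true'] at h
      simp [pvSweep?, h.1, hc]
    | b :: t, h =>
      simp only [List.cons_append, pvIrred, Bool.and_eq_true, Bool.not_eq_true'] at h
      have := ih p c tail h.2 hc
      simp only [List.cons_append, pvSweep?]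
      have hab : pvCancels a b = false := h.1
      rw [show ((b :: t) ++ p :: c :: tail) = b :: (t ++ p :: c :: tail) by simp] at *
      simp [hab, this]

theorem pvMain : ∀ (cs acc : List Char), pvIrred acc.reverse = true →
    pvReduce (acc.reverse ++ cs) = (List.foldl pvStackStep acc cs).reverse := by
  intro cs
  induction cs with
  | nil => intro acc h; simpa using pvReduce_irred _ h
  | cons c cs' ih =>
    intro acc h
    match acc with
    | [] =>
      have := ih [c] (by rfl)
      simpa [pvStackStep] using this
    | p :: rest =>
      by_cases hc : pvCancels p c = true
      · have hrev : (p :: rest).reverse = rest.reverse ++ [p] := by simp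
        rw [hrev] at h
        have hs : pvSweep? (rest.reverse ++ p :: c :: cs') = some (rest.reverse ++ cs') :=
          pvSweep_append rest.reverse p c cs' h hc
        have hstep : (p :: rest).reverse ++ c :: cs' = rest.reverse ++ p :: c :: cs' := by simp
        rw [hstep, pvReduce, hs]
        show pvReduce (rest.reverse ++ cs') = _
        rw [ih rest (pvIrred_dropLast rest.reverse p h)]
        simp [pvStackStep, hc]
      · have hc' : pvCancels p c = false := by simpa using hc
        have hrev : (p :: rest).reverse = rest.reverse ++ [p] := by simp
        rw [hrev] at h
        have hirr : pvIrred ((c :: p :: rest).reverse) = true := by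
          simpa using pvIrred_push rest.reverse p c h hc'
        have := ih (c :: p :: rest) hirr
        have hlist : (p :: rest).reverse ++ c :: cs' = (c :: p :: rest).reverse ++ cs' := by simp
        rw [hrev] at hlist ⊢
        rw [hlist, this]
        simp [pvStackStep, hc']

-- ===== VERDICT (by name: the statement is the Claim_ definition above) =====
theorem resultingString_spec : Claim_equal_resultingString := by
  intro s _
  unfold Spec_resultingString resultingString resultingString_alt
  have h := pvMain s.toList [] (by rfl)
  simp only [List.reverse_nil, List.nil_append] at h
  rw [← h]
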